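-- pv_equiv track=rewrite | github.com/sravanneeli/coding_scripts_python | negative_sub_array.py | maxset
-- ===== SOURCE A (Python) =====
-- def maxset(A):
--     n = len(A)
--     i = 0
--     temp = []
--     sub_array_list = []
--     while i < len(A):
--         if A[i] < 0:
--             sub_array_list.append(temp)
--             temp = []
--             i += 1
--         else:
--             temp.append(A[i])
--             i += 1
--     sub_array_list.append(temp)
--     sum_sub = [0] * len(sub_array_list)
--     for i, sub in enumerate(sub_array_list):
--         sum_sub[i] = sum(sub)
--     max_sum = max(sum_sub)
--     max_sub = []
--     for sub in sub_array_list: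
--         if sum(sub) == max_sum:
--             max_sub.append(sub)
--     if len(max_sub) == 1:
--         return max_sub[0]
--     else:
--         maxList = max(x for x in max_sub)
--         return maxList
-- ===== SOURCE B (Python) =====
-- def maxset(A):
--     # One pass: keep the current nonnegative segment and its running sum,
--     # and the best (sum, segment) seen so far; finalize at each negative and at the end.
--     best_sum = None
--     best = []
--     cur = []
--     cur_sum = 0
--     for x in A:
--         if x < 0:
--             if best_sum is None or cur_sum > best_sum or (cur_sum == best_sum and cur > best):
--                 best_sum, best = cur_sum, cur
--             cur = []
--             cur_sum = 0
--         else: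
--             cur.append(x)
--             cur_sum += x
--     if best_sum is None or cur_sum > best_sum or (cur_sum == best_sum and cur > best):
--         best_sum, best = cur_sum, cur
--     return best
-- ===== Notes on version B (the rewrite author's own statement) =====
-- stated objective: simpler
-- what changed: Replaces A's four passes (index-based split into segments, a sums array, max of sums, filter with re-summation + lexicographic max over the surviving segments) by a single pass that keeps the current segment, its running sum, and the best (sum, segment) pair, finalizing at each negative element and at the end.
import Mathlib
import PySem

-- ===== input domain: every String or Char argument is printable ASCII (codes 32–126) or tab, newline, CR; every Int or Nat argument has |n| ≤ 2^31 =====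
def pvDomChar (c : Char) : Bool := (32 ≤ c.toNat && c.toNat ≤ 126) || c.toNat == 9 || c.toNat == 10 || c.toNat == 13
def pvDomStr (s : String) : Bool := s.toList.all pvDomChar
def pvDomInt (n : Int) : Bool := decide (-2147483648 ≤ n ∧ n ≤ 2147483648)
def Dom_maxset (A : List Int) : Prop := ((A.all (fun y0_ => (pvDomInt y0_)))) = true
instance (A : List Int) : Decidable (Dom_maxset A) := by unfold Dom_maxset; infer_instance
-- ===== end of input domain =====

-- B replaces A's three passes (split into segments, per-segment sums, filter + max)
-- by a single pass keeping the current segment, its running sum and the best (sum, segment);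
-- objective: simpler one-pass decomposition (same asymptotic cost).

-- ===== PORT A =====
-- the while loop: temp / sub_array_list accumulators, returned at loop exit
def maxsetSplitLoop : List Int → List Int → List (List Int) → List Int × List (List Int)
  | [], temp, subs => (temp, subs)
  | a :: rest, temp, subs =>
      if a < 0 then maxsetSplitLoop rest [] (subs ++ [temp])
      else maxsetSplitLoop rest (temp ++ [a]) subs

def maxset (A : List Int) : List Int :=
  let p := maxsetSplitLoop A [] []
  let subArrayList := p.2 ++ [p.1]          -- sub_array_list.append(temp) after the loop
  let sumSub := subArrayList.map List.sum   -- sum_sub[i] = sum(sub)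
  let maxSum := (PySem.List.max? sumSub (fun y => y)).getD 0   -- max(sum_sub); sumSub ≠ []
  let maxSub := subArrayList.foldl (fun acc sub => if sub.sum == maxSum then acc ++ [sub] else acc) []
  if maxSub.length == 1 then maxSub.headI   -- max_sub[0]; guarded, maxSub nonempty
  else (PySem.List.max? maxSub (fun y => y)).getD []   -- max over lists = Python lexicographic max

-- ===== PORT B =====
-- the finalize step: best_sum is None / compare sums, tie-break lexicographically
def maxsetFinalize (bestSum : Option Int) (best cur : List Int) (curSum : Int) : Int × List Int :=
  match bestSum with
  | none => (curSum, cur)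
  | some b => if curSum > b ∨ (curSum = b ∧ best < cur) then (curSum, cur) else (b, best)

def maxsetLoop : List Int → Option Int → List Int → List Int → Int → List Int
  | [], bestSum, best, cur, curSum => (maxsetFinalize bestSum best cur curSum).2
  | x :: rest, bestSum, best, cur, curSum =>
      if x < 0 then
        let p := maxsetFinalize bestSum best cur curSum
        maxsetLoop rest (some p.1) p.2 [] 0
      else maxsetLoop rest bestSum best (cur ++ [x]) (curSum + x)

def maxset_alt (A : List Int) : List Int := maxsetLoop A none [] [] 0

-- ===== PRECONDITION & SPEC =====
def Spec_maxset (A : List Int) (out : List Int) : Prop := out = maxset_alt A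
instance (A : List Int) (out : List Int) : Decidable (Spec_maxset A out) := by unfold Spec_maxset; infer_instance

-- ===== CLAIM (what is proved, stated in full; the proofs are below) =====
def Claim_equal_maxset : Prop := ∀ (A : List Int), Dom_maxset A → Spec_maxset A (maxset A)

-- ===== LEMMAS AND PROOFS =====

-- the segment decomposition both programs traverse
def segsOf : List Int → List Int → List (List Int)
  | [], temp => [temp]
  | a :: rest, temp => if a < 0 then temp :: segsOf rest [] else segsOf rest (temp ++ [a])

theorem segsOf_ne_nil (l temp : List Int) : segsOf l temp ≠ [] := by
  induction l generalizing temp with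
  | nil => simp [segsOf]
  | cons a rest ih => simp only [segsOf]; split <;> simp [ih]

theorem splitLoop_eq_segsOf (l : List Int) : ∀ (temp : List Int) (subs : List (List Int)),
    (maxsetSplitLoop l temp subs).2 ++ [(maxsetSplitLoop l temp subs).1] = subs ++ segsOf l temp := by
  induction l with
  | nil => intro temp subs; simp [maxsetSplitLoop, segsOf]
  | cons a rest ih =>
      intro temp subs
      simp only [maxsetSplitLoop, segsOf]
      split
      · rw [ih]; simp
      · rw [ih]

-- B's "replace best?" step as a binary operation on segments
def combine (x y : List Int) : List Int :=
  if y.sum > x.sum ∨ (y.sum = x.sum ∧ x < y) then y else x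

theorem finalize_some (best cur : List Int) :
    maxsetFinalize (some best.sum) best cur cur.sum = ((combine best cur).sum, combine best cur) := by
  simp only [maxsetFinalize, combine]
  split <;> rfl

theorem loop_some (rest : List Int) : ∀ (best cur : List Int),
    maxsetLoop rest (some best.sum) best cur cur.sum = (segsOf rest cur).foldl combine best := by
  induction rest with
  | nil => intro best cur; simp [maxsetLoop, finalize_some, segsOf]
  | cons x t ih =>
      intro best cur
      simp only [maxsetLoop, segsOf]
      split
      · rw [finalize_some]
        have h0 : (0 : Int) = ([] : List Int).sum := by simp
        rw [h0, ih (combine best cur) []]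
        simp
      · have hs : cur.sum + x = (cur ++ [x]).sum := by simp
        rw [hs, ih best (cur ++ [x])]

theorem loop_none (rest : List Int) : ∀ (cur : List Int),
    maxsetLoop rest none [] cur cur.sum =
      match segsOf rest cur with
      | [] => []
      | s :: t => t.foldl combine s := by
  induction rest with
  | nil => intro cur; simp [maxsetLoop, maxsetFinalize, segsOf]
  | cons x t ih =>
      intro cur
      simp only [maxsetLoop, segsOf, maxsetFinalize]
      split
      · have h0 : (0 : Int) = ([] : List Int).sum := by simp
        rw [h0, loop_some t cur []]
      · have hs : cur.sum + x = (cur ++ [x]).sum := by simp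
        rw [hs, ih (cur ++ [x])]

-- the value both programs compute: a max-sum segment, lexicographically greatest among those
def IsSel (segs : List (List Int)) (c : List Int) : Prop :=
  c ∈ segs ∧ (∀ x ∈ segs, x.sum ≤ c.sum) ∧ (∀ x ∈ segs, x.sum = c.sum → x ≤ c)

theorem IsSel_unique {segs : List (List Int)} {c c' : List Int}
    (h : IsSel segs c) (h' : IsSel segs c') : c = c' := by
  obtain ⟨hm, hs, hl⟩ := h
  obtain ⟨hm', hs', hl'⟩ := h'
  have e1 : c.sum = c'.sum := le_antisymm (hs' c hm) (hs c' hm')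
  exact le_antisymm (hl' c hm e1) (hl c' hm' e1.symm)

theorem combine_cases (x y : List Int) : combine x y = x ∨ combine x y = y := by
  unfold combine; split <;> simp

theorem sum_le_combine_left (x y : List Int) : x.sum ≤ (combine x y).sum := by
  by_cases hc : y.sum > x.sum ∨ (y.sum = x.sum ∧ x < y)
  · rw [combine, if_pos hc]; rcases hc with h | ⟨h, _⟩ <;> omega
  · rw [combine, if_neg hc]

theorem sum_le_combine_right (x y : List Int) : y.sum ≤ (combine x y).sum := by
  by_cases hc : y.sum > x.sum ∨ (y.sum = x.sum ∧ x < y)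
  · rw [combine, if_pos hc]
  · rw [combine, if_neg hc]; exact not_lt.mp (fun hlt => hc (Or.inl hlt))

theorem le_combine_left (x y : List Int) (h : x.sum = (combine x y).sum) : x ≤ combine x y := by
  by_cases hc : y.sum > x.sum ∨ (y.sum = x.sum ∧ x < y)
  · rw [combine, if_pos hc] at h ⊢
    rcases hc with hgt | ⟨_, hlt⟩
    · exact absurd h.symm (ne_of_gt hgt)
    · exact le_of_lt hlt
  · rw [combine, if_neg hc]

theorem le_combine_right (x y : List Int) (h : y.sum = (combine x y).sum) : y ≤ combine x y := by
  by_cases hc : y.sum > x.sum ∨ (y.sum = x.sum ∧ x < y)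
  · rw [combine, if_pos hc]
  · rw [combine, if_neg hc] at h ⊢
    exact not_lt.mp (fun hlt => hc (Or.inr ⟨h, hlt⟩))

theorem IsSel_foldl (t : List (List Int)) : ∀ s, IsSel (s :: t) (t.foldl combine s) := by
  induction t with
  | nil =>
      intro s
      refine ⟨by simp, ?_, ?_⟩ <;> intro x hx <;> simp at hx <;> simp [hx]
  | cons y t ih =>
      intro s
      obtain ⟨hm, hs, hl⟩ := ih (combine s y)
      simp only [List.mem_cons] at hm hs hl
      simp only [List.foldl_cons]
      have hcb : (combine s y).sum ≤ (List.foldl combine (combine s y) t).sum :=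
        hs (combine s y) (Or.inl rfl)
      refine ⟨?_, ?_, ?_⟩
      · simp only [List.mem_cons]
        rcases hm with h | h
        · rcases combine_cases s y with hc | hc
          · exact Or.inl (h.trans hc)
          · exact Or.inr (Or.inl (h.trans hc))
        · exact Or.inr (Or.inr h)
      · intro x hx
        simp only [List.mem_cons] at hx
        rcases hx with hx | hx | hx
        · subst hx; exact le_trans (sum_le_combine_left x y) hcb
        · subst hx; exact le_trans (sum_le_combine_right s x) hcb
        · exact hs x (Or.inr hx)
      · intro x hx hsum
        simp only [List.mem_cons] at hx
        rcases hx with hx | hx | hx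
        · subst hx
          have he : x.sum = (combine x y).sum :=
            le_antisymm (sum_le_combine_left x y) (by rw [hsum]; exact hcb)
          exact le_trans (le_combine_left x y he) (hl (combine x y) (Or.inl rfl) (by omega))
        · subst hx
          have he : x.sum = (combine s x).sum :=
            le_antisymm (sum_le_combine_right s x) (by rw [hsum]; exact hcb)
          exact le_trans (le_combine_right s x he) (hl (combine s x) (Or.inl rfl) (by omega))
        · exact hl x (Or.inr hx) hsum

theorem IsSel_alt (A : List Int) :
    IsSel (segsOf A []) (maxset_alt A) := by
  have h0 : (0 : Int) = ([] : List Int).sum := by simp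
  unfold maxset_alt
  rw [h0, loop_none A []]
  rcases hseg : segsOf A [] with _ | ⟨s, t⟩
  · exact absurd hseg (segsOf_ne_nil A [])
  · exact IsSel_foldl t s

-- bridge between the port's elaborated LT/DecidableLT instances on List Int and the
-- LinearOrder-derived ones that PySem.List.max?_isMax expects (they decide the same order)
theorem maxLT_convert (maxSub : List (List Int)) (m : List Int)
    (hm : PySem.List.max? maxSub (fun y => y) = some m) :
    @PySem.List.max? (List Int) (List Int) List.instLinearOrder.toLT LinearOrder.toDecidableLT maxSub (fun y => y) = some m := by
  have hinst : (LinearOrder.toDecidableLT (α := List Int)) = (fun (a b : List Int) => a.decidableLT b) := by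
    funext a b; exact Subsingleton.elim _ _
  rw [hinst]; exact hm

-- A's selection passes, abstracted over the segment list (proof helper)
def selA (segs : List (List Int)) : List Int :=
  let maxSum := (PySem.List.max? (segs.map List.sum) (fun y => y)).getD 0
  let maxSub := segs.foldl (fun acc sub => if sub.sum == maxSum then acc ++ [sub] else acc) []
  if maxSub.length == 1 then maxSub.headI
  else (PySem.List.max? maxSub (fun y => y)).getD []

theorem maxset_eq_selA (A : List Int) : maxset A = selA (segsOf A []) := by
  unfold maxset selA
  simp only [splitLoop_eq_segsOf, List.nil_append]

theorem IsSel_selA (s : List Int) (t : List (List Int)) : IsSel (s :: t) (selA (s :: t)) := by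
  unfold selA
  simp only [List.map_cons, PySem.List.max?_id_cons, Option.getD_some]
  set M := (t.map List.sum).foldl max s.sum with hM
  have hub : ∀ x ∈ s :: t, x.sum ≤ M := by
    intro x hx
    simp only [List.mem_cons] at hx
    rcases hx with hx | hx
    · rw [hx]; exact (PySem.List.le_foldl_max (t.map List.sum) s.sum).1
    · exact (PySem.List.le_foldl_max (t.map List.sum) s.sum).2 x.sum (List.mem_map_of_mem hx)
  have hex : ∃ e ∈ s :: t, e.sum = M := by
    rcases PySem.List.foldl_max_mem (t.map List.sum) s.sum with h | h
    · exact ⟨s, by simp, h.symm⟩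
    · rcases List.mem_map.mp h with ⟨e, he, hesum⟩
      exact ⟨e, by simp [he], hesum⟩
  rw [PySem.List.foldl_append_if_eq_filter]
  simp only [List.nil_append]
  set maxSub := (s :: t).filter (fun sub => sub.sum == M) with hms
  have hmem_filter : ∀ x, x ∈ maxSub ↔ x ∈ s :: t ∧ x.sum = M := by
    intro x; rw [hms, List.mem_filter]; simp
  have hne : maxSub ≠ [] := by
    rcases hex with ⟨e, he, hesum⟩
    intro hnil
    have : e ∈ maxSub := (hmem_filter e).mpr ⟨he, hesum⟩
    rw [hnil] at this; exact absurd this (List.not_mem_nil)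
  split
  · next hlen =>
      have hlen1 : maxSub.length = 1 := by simpa using hlen
      rcases List.length_eq_one_iff.mp hlen1 with ⟨e, he⟩
      rw [he]
      simp only [List.headI]
      have heprop := (hmem_filter e).mp (by rw [he]; simp)
      refine ⟨heprop.1, ?_, ?_⟩
      · intro x hx; rw [heprop.2]; exact hub x hx
      · intro x hx hsum
        have : x ∈ maxSub := (hmem_filter x).mpr ⟨hx, by rw [hsum, heprop.2]⟩
        rw [he] at this; simp at this; exact le_of_eq this
  · rcases hm : PySem.List.max? maxSub (fun y => y) with _ | m
    · exact absurd ((PySem.List.max?_eq_none_iff maxSub (fun y => y)).mp hm) hne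
    · simp only [Option.getD_some]
      have hmmem := PySem.List.max?_mem hm
      have hmprop := (hmem_filter m).mp hmmem
      refine ⟨hmprop.1, ?_, ?_⟩
      · intro x hx; rw [hmprop.2]; exact hub x hx
      · intro x hx hsum
        have hxf : x ∈ maxSub := (hmem_filter x).mpr ⟨hx, by rw [hsum, hmprop.2]⟩
        exact PySem.List.max?_isMax (maxLT_convert maxSub m hm) x hxf

theorem IsSel_a (A : List Int) : IsSel (segsOf A []) (maxset A) := by
  rw [maxset_eq_selA]
  rcases hseg : segsOf A [] with _ | ⟨s, t⟩
  · exact absurd hseg (segsOf_ne_nil A [])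
  · exact IsSel_selA s t

-- ===== VERDICT (by name: the statement is the Claim_ definition above) =====
theorem maxset_spec : Claim_equal_maxset := by
  intro A _
  unfold Spec_maxset
  exact IsSel_unique (IsSel_a A) (IsSel_alt A)
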